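-- pv_equiv track=rewrite | github.com/Bascule-RS/Python_training | checkio_jeu7janvier2021.py | beginning_zeros
-- ===== SOURCE A (Python) =====
-- def beginning_zeros(number: str) -> int:
--     count_zero = 0
--     for i, num in enumerate(number):
--         if num == '0':
--             count_zero += 1
--             if i == len(number)- 1:
--                 break
--         elif num != '0':
--             break
--
--     return count_zero
-- ===== SOURCE B (Python) =====
-- def beginning_zeros(number: str) -> int:
--     return len(number) - len(number.lstrip('0'))
-- ===== Notes on version B (the rewrite author's own statement) =====
-- stated objective: idiomatic
-- what changed: Replaces the explicit enumerate loop with a break and a counter by a closed length-difference over lstrip('0').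
import Mathlib
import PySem

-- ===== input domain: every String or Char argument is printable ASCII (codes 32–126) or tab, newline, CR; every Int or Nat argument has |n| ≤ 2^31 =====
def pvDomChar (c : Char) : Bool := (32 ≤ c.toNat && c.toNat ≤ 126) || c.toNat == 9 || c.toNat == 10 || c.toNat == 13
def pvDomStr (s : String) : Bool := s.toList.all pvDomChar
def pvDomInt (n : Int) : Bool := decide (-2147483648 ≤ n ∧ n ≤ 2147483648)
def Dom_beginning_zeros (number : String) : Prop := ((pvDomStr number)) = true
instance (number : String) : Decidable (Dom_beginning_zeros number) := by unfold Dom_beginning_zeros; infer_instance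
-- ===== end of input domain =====

-- B replaces A's enumerate loop (counter + break) by the closed form len(s) - len(s.lstrip('0')); same value on all inputs.

-- ===== PORT A =====
-- literal port of A's for-loop over enumerate(number) with its two breaks
def beginning_zerosLoop (len : Int) : List Char → Int → Int → Int
  | [], _, count_zero => count_zero
  | c :: rest, i, count_zero =>
    if c = '0' then
      let count_zero := count_zero + 1
      if i = len - 1 then count_zero
      else beginning_zerosLoop len rest (i + 1) count_zero
    else count_zero

def beginning_zeros (number : String) : Int :=
  beginning_zerosLoop (number.toList.length : Int) number.toList 0 0

-- ===== PORT B =====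
-- len(number) - len(number.lstrip('0'))
def beginning_zeros_alt (number : String) : Int :=
  (number.toList.length : Int) - ((number.toList.dropWhile (fun c => c = '0')).length : Int)

-- ===== PRECONDITION & SPEC =====
def Spec_beginning_zeros (number : String) (out : Int) : Prop := out = beginning_zeros_alt number
instance (number : String) (out : Int) : Decidable (Spec_beginning_zeros number out) := by unfold Spec_beginning_zeros; infer_instance

-- ===== CLAIM (what is proved, stated in full; the proofs are below) =====
def Claim_equal_beginning_zeros : Prop := ∀ (number : String), Dom_beginning_zeros number → Spec_beginning_zeros number (beginning_zeros number)

-- ===== LEMMAS AND PROOFS =====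
theorem beginning_zerosLoop_eq (n : Int) (l : List Char) (i c : Int)
    (h : i + l.length = n) :
    beginning_zerosLoop n l i c
      = c + ((l.length : Int) - ((l.dropWhile (fun ch => ch = '0')).length : Int)) := by
  induction l generalizing i c with
  | nil => simp [beginning_zerosLoop]
  | cons hd tl ih =>
    simp only [beginning_zerosLoop, List.dropWhile]
    by_cases hz : hd = '0'
    · simp only [hz, decide_true]
      by_cases hi : i = n - 1
      · have htl : tl.length = 0 := by
          simp only [List.length_cons] at h; omega
        have : tl = [] := List.length_eq_zero_iff.mp htl
        subst this
        simp [hi]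
      · rw [if_neg hi, ih (i + 1) (c + 1) (by simp at h ⊢; omega)]
        have hd' : ((tl.dropWhile (fun ch => ch = '0')).length : Int) ≤ tl.length := by
          exact_mod_cast List.length_dropWhile_le _ _
        simp only [List.length_cons]
        push_cast
        omega
    · simp only [hz, if_false]
      simp [List.length_cons]

-- ===== VERDICT (by name: the statement is the Claim_ definition above) =====
theorem beginning_zeros_spec : Claim_equal_beginning_zeros := by
  intro number _
  unfold Spec_beginning_zeros beginning_zeros beginning_zeros_alt
  rw [beginning_zerosLoop_eq _ _ _ _ (by simp)]
  ring
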